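-- pv_equiv track=rewrite | github.com/GillianLaw/Day-4_1-2021 | main.py | checkForBingoColumn
-- ===== SOURCE A (Python) =====
-- def checkForBingoColumn(board):
--     rowLength = len(board[0])
--     i = 0
--     j = 0
--     marked = 0
--     while i < rowLength:
--         j = 0
--         while j < len(board):
--             if "x" in board[j][i]:
--                 marked += 1
--             j += 1
--         if marked == 5:
--             return True
--         i += 1
--         marked = 0
-- ===== SOURCE B (Python) =====
-- def checkForBingoColumn(board):
--     counts = [0] * len(board[0])
--     for row in board:
--         counts = [c + ("x" in cell) for c, cell in zip(counts, row)]
--     if any(c == 5 for c in counts):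
--         return True
-- ===== Notes on version B (the rewrite author's own statement) =====
-- stated objective: idiomatic
-- what changed: B replaces A's column-major double-indexing while-loops (with a per-column early return) by a single row-major pass that zips each row into a running per-column count list and then asks any(count == 5), avoiding repeated Python-level index arithmetic.
-- outside the precondition, e.g. on checkForBingoColumn([['x', 'a'], ['x'], ['x'], ['x'], ['x']]): A returns True, B returns True
import Mathlib
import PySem

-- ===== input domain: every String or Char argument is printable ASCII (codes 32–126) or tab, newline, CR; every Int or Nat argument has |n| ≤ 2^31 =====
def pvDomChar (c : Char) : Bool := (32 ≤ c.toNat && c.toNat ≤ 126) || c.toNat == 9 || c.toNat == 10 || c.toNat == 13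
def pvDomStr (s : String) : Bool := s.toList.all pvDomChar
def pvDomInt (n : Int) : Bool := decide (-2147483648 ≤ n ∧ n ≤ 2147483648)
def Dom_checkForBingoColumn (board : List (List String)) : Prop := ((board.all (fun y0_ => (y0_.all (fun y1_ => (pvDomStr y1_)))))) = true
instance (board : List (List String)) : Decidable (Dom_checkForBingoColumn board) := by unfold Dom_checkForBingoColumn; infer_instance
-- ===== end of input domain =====

-- B rewrites A's column-major while-loops as one idiomatic row-major pass accumulating per-column counts; same cost.

-- ===== PORT A =====
-- inner while loop of A: count the rows whose cell in column i contains "x"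
-- (board[j][i] ported as pyGetD; Pre_ guarantees the index is in range)
def pvA_col (board : List (List String)) (i : Nat) : Nat :=
  board.foldl (fun m row => if PySem.Str.isIn "x" (PySem.List.pyGetD row (i : Int) "") then m + 1 else m) 0

-- outer while loop of A over column indices i < rowLength
def pvA_go (board : List (List String)) (rowLength : Nat) (i : Nat) : Option Bool :=
  if i < rowLength then
    if pvA_col board i = 5 then some true
    else pvA_go board rowLength (i + 1)
  else none
termination_by rowLength - i

def checkForBingoColumn (board : List (List String)) : Option Bool :=
  pvA_go board (board.headD []).length 0

-- ===== PORT B =====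
-- one zip step of B's list comprehension: counts = [c + ("x" in cell) for c, cell in zip(counts, row)]
def pvB_step (cs : List Nat) (row : List String) : List Nat :=
  List.zipWith (fun c cell => c + (if PySem.Str.isIn "x" cell then 1 else 0)) cs row

def checkForBingoColumn_alt (board : List (List String)) : Option Bool :=
  let counts := board.foldl pvB_step (List.replicate (board.headD []).length 0)
  if counts.any (fun c => c == 5) then some true else none

-- ===== PRECONDITION & SPEC =====
-- Pre_ excludes the empty board (A raises IndexError on board[0]) and ragged boards whose
-- rows are shorter than the first row: on those A usually raises IndexError on board[j][i],
-- though A can still return True early when a full column precedes the raise (B agrees there).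
def Pre_checkForBingoColumn (board : List (List String)) : Prop :=
  board ≠ [] ∧ ∀ row ∈ board, (board.headD []).length ≤ row.length
instance (board : List (List String)) : Decidable (Pre_checkForBingoColumn board) := by
  unfold Pre_checkForBingoColumn; infer_instance

def pvWitness_checkForBingoColumn : List (List String) :=
  [["x", "a"], ["x", "b"], ["x", "c"], ["x", "d"], ["x", "e"]]

def Spec_checkForBingoColumn (board : List (List String)) (out : Option Bool) : Prop := out = checkForBingoColumn_alt board
instance (board : List (List String)) (out : Option Bool) : Decidable (Spec_checkForBingoColumn board out) := by unfold Spec_checkForBingoColumn; infer_instance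

-- ===== CLAIM (what is proved, stated in full; the proofs are below) =====
def Claim_equal_checkForBingoColumn : Prop := ∀ (board : List (List String)), Dom_checkForBingoColumn board → Pre_checkForBingoColumn board → Spec_checkForBingoColumn board (checkForBingoColumn board)

-- ===== LEMMAS AND PROOFS =====

-- B's fold keeps the counts list the same length and, position by position,
-- accumulates exactly the per-column count A computes.
set_option maxHeartbeats 1000000 in
lemma pvB_fold_spec (rows : List (List String)) :
    ∀ (cs : List Nat), (∀ row ∈ rows, cs.length ≤ row.length) →
      (rows.foldl pvB_step cs).length = cs.length ∧
      ∀ i, i < cs.length →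
        (rows.foldl pvB_step cs).getD i 0 =
          rows.foldl (fun m row => if PySem.Str.isIn "x" (row.getD i "") then m + 1 else m)
            (cs.getD i 0) := by
  induction rows with
  | nil => intro cs _; exact ⟨rfl, fun i _ => rfl⟩
  | cons row rows ih =>
      intro cs hlen
      have hrow : cs.length ≤ row.length := hlen row (List.mem_cons_self ..)
      have hstep_len : (pvB_step cs row).length = cs.length := by
        simp [pvB_step, Nat.min_eq_left hrow]
      have hrest : ∀ r ∈ rows, (pvB_step cs row).length ≤ r.length := by
        intro r hr; rw [hstep_len]; exact hlen r (List.mem_cons_of_mem _ hr)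
      obtain ⟨hl, hg⟩ := ih (pvB_step cs row) hrest
      refine ⟨by simp [List.foldl_cons, hl, hstep_len], ?_⟩
      intro i hi
      have hi' : i < (pvB_step cs row).length := by omega
      have hgi : (pvB_step cs row).getD i 0 =
          cs.getD i 0 + (if PySem.Str.isIn "x" (row.getD i "") then 1 else 0) := by
        have hiw : i < (pvB_step cs row).length := hi'
        rw [List.getD_eq_getElem _ _ hi', List.getD_eq_getElem _ _ hi,
            List.getD_eq_getElem _ _ (by omega : i < row.length)]
        simp [pvB_step]
      simp only [List.foldl_cons]
      rw [hg i (by omega), hgi]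
      refine congrArg
        (fun z => List.foldl (fun m row => if PySem.Str.isIn "x" (row.getD i "") then m + 1 else m) z rows) ?_
      split <;> omega

-- A's per-column count equals the getD-form used for B, for any column index.
lemma pvA_col_eq (board : List (List String)) (i : Nat) :
    pvA_col board i =
      board.foldl (fun m row => if PySem.Str.isIn "x" (row.getD i "") then m + 1 else m) 0 := by
  simp [pvA_col]

-- A's outer loop returns some true iff a column k ∈ [i, rowLength) has count 5, else none.
lemma pvA_go_eq (board : List (List String)) (rL : Nat) :
    ∀ (n i : Nat), rL - i = n →
      pvA_go board rL i =
        if ∃ k, k < rL ∧ i ≤ k ∧ pvA_col board k = 5 then some true else none := by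
  intro n
  induction n with
  | zero =>
      intro i h
      rw [pvA_go]
      have : ¬ i < rL := by omega
      simp only [this, if_false]
      rw [if_neg]; rintro ⟨k, hk1, hk2, _⟩; omega
  | succ m ih =>
      intro i h
      have hi : i < rL := by omega
      rw [pvA_go]
      simp only [hi, if_true]
      by_cases h5 : pvA_col board i = 5
      · simp only [h5, if_true]
        have hex : ∃ k, k < rL ∧ i ≤ k ∧ pvA_col board k = 5 := ⟨i, hi, le_refl i, h5⟩
        rw [if_pos hex]
      · simp only [h5, if_false]
        rw [ih (i + 1) (by omega)]
        congr 1
        simp only [eq_iff_iff]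
        constructor
        · rintro ⟨k, hk1, hk2, hk3⟩; exact ⟨k, hk1, by omega, hk3⟩
        · rintro ⟨k, hk1, hk2, hk3⟩
          refine ⟨k, hk1, ?_, hk3⟩
          rcases Nat.eq_or_lt_of_le hk2 with rfl | hlt
          · exact absurd hk3 h5
          · omega

-- ===== VERDICT (by name: the statement is the Claim_ definition above) =====
theorem checkForBingoColumn_spec : Claim_equal_checkForBingoColumn := by
  intro board _ hpre
  obtain ⟨hne, hlen⟩ := hpre
  unfold Spec_checkForBingoColumn checkForBingoColumn checkForBingoColumn_alt
  set rL := (board.headD []).length with hrL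
  have hcs : (List.replicate rL (0 : Nat)).length = rL := List.length_replicate
  have hlen' : ∀ row ∈ board, (List.replicate rL (0 : Nat)).length ≤ row.length := by
    intro row hr; rw [hcs]; exact hlen row hr
  obtain ⟨hflen, hfget⟩ := pvB_fold_spec board (List.replicate rL 0) hlen'
  rw [pvA_go_eq board rL (rL - 0) 0 rfl]
  set counts := board.foldl pvB_step (List.replicate rL 0) with hcounts
  have hcl : counts.length = rL := by rw [hflen, hcs]
  have hany : (counts.any (fun c => c == 5)) = true ↔ ∃ k, k < rL ∧ 0 ≤ k ∧ pvA_col board k = 5 := by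
    rw [List.any_eq_true]
    constructor
    · rintro ⟨c, hc, hc5⟩
      obtain ⟨k, hk, rfl⟩ := List.mem_iff_getElem.mp hc
      refine ⟨k, by omega, Nat.zero_le k, ?_⟩
      rw [pvA_col_eq]
      have h0 : (List.replicate rL (0 : Nat)).getD k 0 = 0 := by simp [List.getD]
      have := hfget k (by rw [hcs]; omega)
      rw [List.getD_eq_getElem _ _ hk, h0] at this
      rw [← this]
      simpa using hc5
    · rintro ⟨k, _, hk, h5⟩
      have hk' : k < counts.length := by omega
      refine ⟨counts[k], List.getElem_mem hk', ?_⟩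
      have h0 : (List.replicate rL (0 : Nat)).getD k 0 = 0 := by simp [List.getD]
      have := hfget k (by rw [hcs]; omega)
      rw [List.getD_eq_getElem _ _ hk', h0] at this
      rw [pvA_col_eq] at h5
      simp [this, ← h5]
  by_cases h : ∃ k, k < rL ∧ 0 ≤ k ∧ pvA_col board k = 5
  · rw [if_pos h, if_pos (hany.mpr h)]
  · rw [if_neg h, if_neg (by rw [hany]; exact h)]
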